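-- pv_equiv track=rewrite | github.com/reald/anytone-flash-tools | interceptor/at_intercept_nonet.py | dehexify
-- ===== SOURCE A (Python) =====
-- def dehexify(hexstr):
--
--    retstr = ''
--
--    if len(hexstr) > 2:
--
--       ascstr = bytes.fromhex(str(hexstr[2:]))
--
--       for i in range(len(ascstr)):
--
--          idec = int(ascstr[i])
--
--          if (32 <= idec and idec < 127) or (160 <= idec):
--             retstr += chr(idec)
--          else:
--             retstr += '.'
--
--    return retstr
-- ===== SOURCE B (Python) =====
-- _NONPRINT = {x: '.' for x in range(256) if not (32 <= x < 127 or x >= 160)}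
--
--
-- def dehexify(hexstr):
--     if len(hexstr) <= 2:
--         return ''
--     return bytes.fromhex(str(hexstr[2:])).decode('latin-1').translate(_NONPRINT)
-- ===== Notes on version B (the rewrite author's own statement) =====
-- stated objective: idiomatic
-- what changed: A classifies each byte with a per-index if/else loop that appends char-by-char to a growing string; B precomputes a 256-entry translation table of the non-printable ordinals once and applies it in one shot with str.translate over the latin-1 decoding.
import Mathlib
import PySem

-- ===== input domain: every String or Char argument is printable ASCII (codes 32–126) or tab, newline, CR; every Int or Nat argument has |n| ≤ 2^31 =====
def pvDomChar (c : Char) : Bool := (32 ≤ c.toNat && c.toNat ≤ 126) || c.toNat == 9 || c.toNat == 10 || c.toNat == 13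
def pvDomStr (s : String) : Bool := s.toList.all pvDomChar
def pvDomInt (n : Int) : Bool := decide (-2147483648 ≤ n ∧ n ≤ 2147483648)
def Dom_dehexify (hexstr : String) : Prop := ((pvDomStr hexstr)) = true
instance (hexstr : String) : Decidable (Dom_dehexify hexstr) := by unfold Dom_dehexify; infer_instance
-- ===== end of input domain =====

-- B replaces A's per-byte if/else classification loop by a precomputed 256-entry translation
-- table applied with a whole-string translate (idiomatic; same cost).

-- bytes.fromhex: shared builtin, ported once (used by both ports).
-- ASCII whitespace skipped between pairs by bytes.fromhex (Python 3.11 semantics)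
def pvIsWS (c : Char) : Bool :=
  c.toNat == 32 || c.toNat == 9 || c.toNat == 10 || c.toNat == 13 || c.toNat == 11 || c.toNat == 12

def pvHexVal? (c : Char) : Option Nat :=
  if 48 ≤ c.toNat ∧ c.toNat ≤ 57 then some (c.toNat - 48)
  else if 97 ≤ c.toNat ∧ c.toNat ≤ 102 then some (c.toNat - 87)
  else if 65 ≤ c.toNat ∧ c.toNat ≤ 70 then some (c.toNat - 55)
  else none

-- bytes.fromhex(s): none exactly where Python raises ValueError
def pyFromhex? : List Char → Option (List Nat)
  | [] => some []
  | c :: rest =>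
    if pvIsWS c then pyFromhex? rest
    else
      match pvHexVal? c, rest with
      | some h, d :: rest' =>
        match pvHexVal? d with
        | some l => (pyFromhex? rest').map (fun t => (16 * h + l) :: t)
        | none => none
      | _, _ => none

-- ===== PORT A =====
def dehexify (hexstr : String) : String :=
  let retstr : List Char := []
  if 2 < hexstr.toList.length then
    match pyFromhex? (hexstr.toList.drop 2) with
    | some ascstr =>
      String.ofList (ascstr.foldl
        (fun retstr idec =>
          if (32 ≤ idec ∧ idec < 127) ∨ 160 ≤ idec then retstr ++ [Char.ofNat idec]
          else retstr ++ ['.']) retstr)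
    | none => ""    -- ValueError; excluded by Pre_
  else String.ofList retstr

-- ===== PORT B =====
-- _NONPRINT = {x: '.' for x in range(256) if not (32 <= x < 127 or x >= 160)}
def pvNonprint : PySem.Dict Nat Char :=
  (List.range 256).foldl
    (fun d x => if ¬ ((32 ≤ x ∧ x < 127) ∨ 160 ≤ x) then d.insert x '.' else d)
    PySem.Dict.empty

-- str.translate: each char is replaced by the table entry for its ordinal, if any
def dehexify_alt (hexstr : String) : String :=
  if hexstr.toList.length ≤ 2 then ""
  else
    match pyFromhex? (hexstr.toList.drop 2) with
    | some data => String.ofList (data.map (fun b => (pvNonprint.get? b).getD (Char.ofNat b)))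
    | none => ""    -- ValueError; excluded by Pre_

-- ===== PRECONDITION & SPEC =====
-- a whitespace-separated token of the payload is acceptable to bytes.fromhex iff it is an
-- even number of hex digits
def pvTokOk (t : List Char) : Bool :=
  t.all (fun c => (pvHexVal? c).isSome) && t.length % 2 == 0

-- Pre_ excludes exactly the inputs on which bytes.fromhex raises ValueError (some
-- whitespace-separated run of the payload is not an even-length string of hex digits),
-- where both Pythons raise.
def Pre_dehexify (hexstr : String) : Prop :=
  ∀ t ∈ (hexstr.toList.drop 2).splitOnP pvIsWS, pvTokOk t = true
instance (hexstr : String) : Decidable (Pre_dehexify hexstr) := by unfold Pre_dehexify; infer_instance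

def pvWitness_dehexify : String := "0x41 7e0a"

def Spec_dehexify (hexstr : String) (out : String) : Prop := out = dehexify_alt hexstr
instance (hexstr : String) (out : String) : Decidable (Spec_dehexify hexstr out) := by unfold Spec_dehexify; infer_instance

-- ===== CLAIM (what is proved, stated in full; the proofs are below) =====
def Claim_equal_dehexify : Prop := ∀ (hexstr : String), Dom_dehexify hexstr → Pre_dehexify hexstr → Spec_dehexify hexstr (dehexify hexstr)

-- ===== LEMMAS AND PROOFS =====

-- every byte produced by fromhex is < 256
theorem pvHexVal?_lt (e : Char) (v : Nat) (hv : pvHexVal? e = some v) : v < 16 := by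
  unfold pvHexVal? at hv
  split_ifs at hv <;> simp_all <;> omega

theorem pyFromhex?_lt (cs : List Char) (bs : List Nat) (h : pyFromhex? cs = some bs) :
    ∀ b ∈ bs, b < 256 := by
  induction cs using pyFromhex?.induct generalizing bs with
  | case1 =>
      simp only [pyFromhex?, Option.some.injEq] at h
      simp [← h]
  | case2 c rest hws ih =>
      rw [pyFromhex?.eq_def] at h
      simp only [hws, if_true] at h
      exact ih bs h
  | case3 c hws hv d rest' hc l hl ih =>
      rw [pyFromhex?.eq_def] at h
      simp only [hws, hc, hl] at h
      rcases hr : pyFromhex? rest' with _ | t <;> rw [hr] at h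
      · exact absurd h (by simp)
      · obtain rfl := Option.some.inj h
        intro b hb
        rcases List.mem_cons.mp hb with rfl | hb
        · have h1 := pvHexVal?_lt c hv hc
          have h2 := pvHexVal?_lt d l hl
          omega
        · exact ih t hr b hb
  | case4 c hws hv d rest' hc hl =>
      rw [pyFromhex?.eq_def] at h
      simp [hws, hc, hl] at h
  | case5 c rest hws hmatch =>
      exfalso
      rcases hc : pvHexVal? c with _ | v
      · rw [pyFromhex?.eq_def] at h
        simp [hws, hc] at h
      · rcases rest with _ | ⟨d, rest'⟩
        · rw [pyFromhex?.eq_def] at h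
          simp [hws, hc] at h
        · exact hmatch v d rest' hc rfl

set_option maxRecDepth 100000 in
theorem table_eq (b : Nat) (hb : b < 256) :
    (if (32 ≤ b ∧ b < 127) ∨ 160 ≤ b then Char.ofNat b else '.')
      = (pvNonprint.get? b).getD (Char.ofNat b) := by
  revert hb; revert b; decide

-- a hex digit is never fromhex whitespace
theorem pvHexVal?_not_ws (e : Char) (v : Nat) (hv : pvHexVal? e = some v) :
    pvIsWS e = false := by
  unfold pvHexVal? at hv
  unfold pvIsWS
  split_ifs at hv <;> simp_all <;> omega

theorem pvTokOk_cons2 (c d : Char) (t : List Char) (h : pvTokOk (c :: d :: t) = true) :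
    pvTokOk t = true := by
  simp only [pvTokOk, List.all_cons, Bool.and_eq_true, beq_iff_eq, List.length_cons] at *
  exact ⟨h.1.2.2, by omega⟩

-- the precondition (every whitespace-separated run is an even number of hex digits) is
-- exactly where bytes.fromhex returns
theorem pyFromhex?_isSome (cs : List Char)
    (hp : ∀ t ∈ cs.splitOnP pvIsWS, pvTokOk t = true) :
    (pyFromhex? cs).isSome = true := by
  induction cs using pyFromhex?.induct with
  | case1 => simp [pyFromhex?]
  | case2 c rest hws ih =>
      rw [pyFromhex?.eq_def]
      simp only [hws, if_true]
      apply ih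
      intro t ht
      apply hp
      rw [List.splitOnP_cons, if_pos hws]
      exact List.mem_cons_of_mem _ ht
  | case3 c hws hv d rest' hc l hl ih =>
      have hcws := eq_false_of_ne_true hws
      have hdws := pvHexVal?_not_ws d l hl
      rw [List.splitOnP_cons, if_neg (by simp [hcws]), List.splitOnP_cons,
          if_neg (by simp [hdws])] at hp
      rcases hsp : rest'.splitOnP pvIsWS with _ | ⟨t0, ls⟩
      · exact absurd hsp (List.splitOnP_ne_nil _ _)
      rw [hsp] at hp
      simp only [List.modifyHead] at hp
      have hrec := ih (by
        intro t ht
        rw [hsp] at ht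
        rcases List.mem_cons.mp ht with rfl | ht
        · exact pvTokOk_cons2 c d t (hp _ (List.mem_cons_self))
        · exact hp _ (List.mem_cons_of_mem _ ht))
      rw [pyFromhex?.eq_def]
      simp only [hws, hc, hl]
      rcases hr : pyFromhex? rest' with _ | t
      · rw [hr] at hrec; simp at hrec
      · simp
  | case4 c hws hv d rest' hc hl =>
      exfalso
      have hcws := eq_false_of_ne_true hws
      rw [List.splitOnP_cons, if_neg (by simp [hcws])] at hp
      rcases hdws : pvIsWS d with _ | _
      · -- d is not whitespace: the first token contains the non-hex d
        rw [List.splitOnP_cons, if_neg (by simp [hdws])] at hp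
        rcases hsp : rest'.splitOnP pvIsWS with _ | ⟨t0, ls⟩
        · exact absurd hsp (List.splitOnP_ne_nil _ _)
        rw [hsp] at hp
        have := hp (c :: d :: t0) (by simp [List.modifyHead])
        simp [pvTokOk, hl] at this
      · -- d is whitespace: the first token is the single hex digit c, odd length
        rw [List.splitOnP_cons, if_pos hdws] at hp
        have := hp [c] (by simp [List.modifyHead])
        simp [pvTokOk] at this
  | case5 c rest hws hmatch =>
      exfalso
      have hcws := eq_false_of_ne_true hws
      rw [List.splitOnP_cons, if_neg (by simp [hcws])] at hp
      rcases hc : pvHexVal? c with _ | v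
      · -- c itself is not a hex digit, but heads the first token
        rcases hsp : rest.splitOnP pvIsWS with _ | ⟨t0, ls⟩
        · exact absurd hsp (List.splitOnP_ne_nil _ _)
        rw [hsp] at hp
        have := hp (c :: t0) (by simp [List.modifyHead])
        simp [pvTokOk, hc] at this
      · rcases rest with _ | ⟨d, rest'⟩
        · -- lone trailing hex digit: odd-length token [c]
          have := hp [c] (by simp [List.splitOnP_nil, List.modifyHead])
          simp [pvTokOk] at this
        · exact hmatch v d rest' hc rfl

set_option maxRecDepth 100000 in
theorem dehexify_spec : Claim_equal_dehexify := by
  intro hexstr _ hpre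
  unfold Spec_dehexify dehexify dehexify_alt
  by_cases h : 2 < hexstr.toList.length
  · rw [if_pos h, if_neg (by omega)]
    obtain ⟨bs, hbs⟩ := Option.isSome_iff_exists.mp (pyFromhex?_isSome _ hpre)
    rw [hbs]
    have hstep :
        (fun (retstr : List Char) (idec : Nat) =>
          if (32 ≤ idec ∧ idec < 127) ∨ 160 ≤ idec then retstr ++ [Char.ofNat idec]
          else retstr ++ ['.'])
        = fun retstr idec =>
            retstr ++ [if (32 ≤ idec ∧ idec < 127) ∨ 160 ≤ idec then Char.ofNat idec else '.'] := by
      funext a x; split_ifs <;> rfl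
    simp only [hstep, PySem.List.foldl_append_singleton_eq_map, List.nil_append]
    congr 1
    exact List.map_congr_left fun b hb =>
      table_eq b (pyFromhex?_lt _ _ hbs b hb)
  · rw [if_neg h, if_pos (by omega)]
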